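-- pv_equiv track=rewrite | github.com/max-f/advent-of-code | 2019/d04.py | part2
-- ===== SOURCE A (Python) =====
-- def part2(start, end) -> int:
--     total = 0
--     for x in range(start, end + 1):
--         xs = str(x)
--         if sorted(xs) == list(xs):
--             same = False
--             increase = True
--             for i in range(0, len(xs)):
--                 j = i + 1
--                 if j == len(xs):
--                     break
--                 if xs[i] > xs[j]:
--                     increase = False
--                     break
--                 if xs[i] == xs[j] and (i == 0 or xs[i - 1] != xs[i]) and (
--                         j == len(xs) - 1 or xs[j + 1] != xs[j]):
--                     same = True
--             if same and increase:
--                 total += 1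
--     return total
-- ===== SOURCE B (Python) =====
-- def part2(start, end) -> int:
--     total = 0
--     for x in range(start, end + 1):
--         s = str(x)
--         if _nondecreasing(s) and 2 in _run_lengths(s):
--             total += 1
--     return total
--
--
-- def _nondecreasing(s):
--     return all(a <= b for a, b in zip(s, s[1:]))
--
--
-- def _run_lengths(s):
--     # lengths of maximal blocks of equal adjacent characters
--     if s == "":
--         return []
--     run = 1
--     while run < len(s) and s[run] == s[0]:
--         run += 1
--     return [run] + _run_lengths(s[run:])
-- ===== Notes on version B (the rewrite author's own statement) =====
-- stated objective: simpler
-- what changed: A's per-number flag machine (sorted()==list() gate plus an indexed scan with same/increase flags, breaks, and a three-way isolated-pair test) is replaced by a plain adjacent-pair non-decreasing check and a run-length decomposition asking whether some maximal run has length exactly 2.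
import Mathlib
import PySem

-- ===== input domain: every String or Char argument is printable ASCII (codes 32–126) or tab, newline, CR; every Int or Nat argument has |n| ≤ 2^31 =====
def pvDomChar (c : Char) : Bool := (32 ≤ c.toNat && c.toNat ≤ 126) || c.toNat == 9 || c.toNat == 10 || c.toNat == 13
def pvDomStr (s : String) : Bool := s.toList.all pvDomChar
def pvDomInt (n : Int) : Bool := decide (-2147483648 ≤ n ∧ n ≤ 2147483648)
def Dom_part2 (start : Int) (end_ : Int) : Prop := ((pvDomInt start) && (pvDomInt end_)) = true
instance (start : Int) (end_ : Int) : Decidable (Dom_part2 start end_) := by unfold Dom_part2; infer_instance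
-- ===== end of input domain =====

-- B replaces A's flag-machine inner scan (same/increase flags, breaks, isolated-pair index test)
-- by a plain adjacent-pair non-decreasing check plus a run-length decomposition (objective: simpler).

-- ===== PORT A =====
-- A's inner 'for i in range(0, len(xs))' loop; state (same, increase); fuel = remaining iterations.
-- Every index the Python code actually reads is in range when it reads it, so getD with a dummy default is exact.
def part2Inner (xs : List Char) : Nat → Nat → Bool → Bool → Bool × Bool
  | 0, _, same, increase => (same, increase)
  | fuel + 1, i, same, increase =>
    let j := i + 1
    if j = xs.length then (same, increase)
    else if xs.getD i ' ' > xs.getD j ' ' then (same, false)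
    else
      let same' := if xs.getD i ' ' = xs.getD j ' ' ∧ (i = 0 ∨ xs.getD (i-1) ' ' ≠ xs.getD i ' ')
                      ∧ (j = xs.length - 1 ∨ xs.getD (j+1) ' ' ≠ xs.getD j ' ')
                   then true else same
      part2Inner xs fuel (i + 1) same' increase

def part2 (start : Int) (end_ : Int) : Int :=
  (PySem.List.pyRange start (end_ + 1) 1).foldl (fun total x =>
    let xs := PySem.Int.toChars x
    if PySem.List.sorted xs (fun c => c) false = xs then
      let r := part2Inner xs xs.length 0 false true
      if r.1 && r.2 then total + 1 else total
    else total) 0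

-- ===== PORT B =====
-- all(a <= b for a, b in zip(s, s[1:]))
def nondec (s : List Char) : Bool := (s.zip (s.drop 1)).all (fun p => decide (p.1 ≤ p.2))

-- _run_lengths: the while loop counts the leading characters of rest equal to s[0] (a takeWhile).
def runLengths (s : List Char) : List Nat :=
  match s with
  | [] => []
  | c :: rest =>
    let t := rest.takeWhile (fun d => d = c)
    (t.length + 1) :: runLengths (rest.drop t.length)
termination_by s.length
decreasing_by simp

def part2_alt (start : Int) (end_ : Int) : Int :=
  (PySem.List.pyRange start (end_ + 1) 1).foldl (fun total x =>
    let s := PySem.Int.toChars x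
    if nondec s && (runLengths s).contains 2 then total + 1 else total) 0

-- ===== PRECONDITION & SPEC =====
def Spec_part2 (start : Int) (end_ : Int) (out : Int) : Prop := out = part2_alt start end_
instance (start : Int) (end_ : Int) (out : Int) : Decidable (Spec_part2 start end_ out) := by unfold Spec_part2; infer_instance

-- ===== CLAIM (what is proved, stated in full; the proofs are below) =====
def Claim_equal_part2 : Prop := ∀ (start : Int) (end_ : Int), Dom_part2 start end_ → Spec_part2 start end_ (part2 start end_)

-- ===== LEMMAS AND PROOFS =====

-- proof-side helper: 'an isolated equal adjacent pair occurs'; prev = character before the current suffix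
def hasDouble : Option Char → List Char → Bool
  | _, [] => false
  | _, [_] => false
  | prev, a :: b :: r =>
    (decide (a = b) && decide (some a ≠ prev) && decide (r.head? ≠ some b)) || hasDouble (some a) (b :: r)

theorem nondec_iff_chain (s : List Char) : nondec s = true ↔ List.IsChain (· ≤ ·) s := by
  induction s with
  | nil => simp [nondec]
  | cons a t ih =>
    cases t with
    | nil => simp [nondec]
    | cons b r =>
      simp [nondec, List.isChain_cons_cons] at *
      exact fun _ => ih

theorem sorted_eq_iff_chain (s : List Char) :
    PySem.List.sorted s (fun c => c) false = s ↔ List.IsChain (· ≤ ·) s := by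
  rw [List.isChain_iff_pairwise]
  constructor
  · intro h
    have := PySem.List.sorted_pairwise s (fun c => c) (κ := Char)
    rwa [h] at this
  · intro h
    exact PySem.List.sorted_eq_self_of_pairwise s (fun c => c) h

-- A's inner loop, on a non-decreasing string, never breaks and its 'same' flag records hasDouble
theorem part2Inner_eq (s : List Char) (hs : List.IsChain (· ≤ ·) s) :
    ∀ (fuel i : Nat) (same : Bool), i + fuel = s.length →
      part2Inner s fuel i same true =
        (same || hasDouble (if i = 0 then none else some (s.getD (i - 1) ' ')) (s.drop i), true) := by
  intro fuel
  induction fuel with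
  | zero =>
    intro i same h
    simp at h
    simp [part2Inner, h, hasDouble]
  | succ fuel ih =>
    intro i same h
    by_cases hj : i + 1 = s.length
    · have hi : i < s.length := by omega
      rw [List.drop_eq_getElem_cons hi]
      have : s.drop (i+1) = [] := by simp; omega
      rw [this]
      simp [part2Inner, hj, hasDouble]
    · have hi1 : i + 1 < s.length := by omega
      have hi : i < s.length := by omega
      have hle : s[i] ≤ s[i+1] := List.isChain_iff_getElem.mp hs i hi1
      have gdi : s.getD i ' ' = s[i] := List.getD_eq_getElem s ' ' hi
      have gdj : s.getD (i+1) ' ' = s[i+1] := List.getD_eq_getElem s ' ' hi1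
      rw [part2Inner]
      simp only [hj, if_false, gdi, gdj]
      rw [if_neg (by exact not_lt.mpr hle)]
      rw [ih (i+1) _ (by omega)]
      rw [List.drop_eq_getElem_cons hi, List.drop_eq_getElem_cons hi1]
      simp only [Nat.add_sub_cancel, Nat.succ_ne_zero, if_false, gdi]
      rw [hasDouble]
      have hcond :
          (s[i] = s[i+1] ∧ (i = 0 ∨ s.getD (i-1) ' ' ≠ s[i])
            ∧ (i + 1 = s.length - 1 ∨ s.getD (i+1+1) ' ' ≠ s[i+1]))
          ↔ (s[i] = s[i+1] ∧ some s[i] ≠ (if i = 0 then none else some (s.getD (i - 1) ' '))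
            ∧ (s.drop (i+1+1)).head? ≠ some s[i+1]) := by
        apply and_congr_right; intro _
        apply and_congr
        · by_cases h0 : i = 0
          · simp [h0]
          · simp [h0]
            exact ne_comm
        · rw [List.head?_drop]
          by_cases h2 : i + 2 < s.length
          · have h2' : i + 1 + 1 < s.length := by omega
            have : ¬ (i + 1 = s.length - 1) := by omega
            simp [this, List.getElem?_eq_getElem h2']
          · rw [List.getElem?_eq_none (by omega)]
            have : i + 1 = s.length - 1 := by omega
            simp [this]
      by_cases hc : (s[i] = s[i+1] ∧ (i = 0 ∨ s.getD (i-1) ' ' ≠ s[i])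
            ∧ (i + 1 = s.length - 1 ∨ s.getD (i+1+1) ' ' ≠ s[i+1]))
      · rw [if_pos hc]
        obtain ⟨p1, p2, p3⟩ := hcond.mp hc
        have e1 : decide (s[i] = s[i+1]) = true := decide_eq_true p1
        have e2 : decide (some s[i] ≠ (if i = 0 then none else some (s.getD (i-1) ' '))) = true :=
          decide_eq_true p2
        have e3 : decide ((List.drop (i+1+1) s).head? ≠ some s[i+1]) = true := decide_eq_true p3
        rw [e1, e2, e3]
        simp
      · rw [if_neg hc]
        have eE : (decide (s[i] = s[i+1])
            && decide (some s[i] ≠ (if i = 0 then none else some (s.getD (i-1) ' ')))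
            && decide ((List.drop (i+1+1) s).head? ≠ some s[i+1])) = false := by
          simp only [← Bool.decide_and]
          exact decide_eq_false (fun hcontra => hc (hcond.mpr ⟨hcontra.1.1, hcontra.1.2, hcontra.2⟩))
        rw [eE]
        simp

-- hasDouble ignores a non-matching prev
theorem hasDouble_prev (c : Char) (s : List Char) (h : s.head? ≠ some c) :
    hasDouble (some c) s = hasDouble none s := by
  cases s with
  | nil => rfl
  | cons a t =>
    cases t with
    | nil => rfl
    | cons b r =>
      simp at h
      simp [hasDouble, h]

theorem hasDouble_run_aux (c : Char) (s' : List Char) (h : s'.head? ≠ some c) :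
    ∀ m, 1 ≤ m → hasDouble (some c) (List.replicate m c ++ s') = hasDouble none s' := by
  intro m
  induction m with
  | zero => omega
  | succ m ih =>
    intro _
    by_cases hm : m = 0
    · subst hm
      simp only [List.replicate_succ, List.replicate_zero, List.cons_append, List.nil_append]
      cases s' with
      | nil => rfl
      | cons b r =>
        have hb : ¬ (c = b) := by simp at h; exact fun e => h e.symm
        rw [hasDouble, hasDouble_prev c (b::r) h]
        simp [hb]
    · have hm1 : 1 ≤ m := by omega
      obtain ⟨k, hk⟩ : ∃ k, m = k + 1 := ⟨m - 1, by omega⟩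
      subst hk
      rw [show List.replicate (k+1+1) c ++ s' = c :: c :: (List.replicate k c ++ s') from by
        simp [List.replicate_succ]]
      rw [hasDouble]
      rw [show (c :: (List.replicate k c ++ s')) = List.replicate (k+1) c ++ s' from by
        simp [List.replicate_succ]]
      simp [ih hm1]

theorem hasDouble_run (c : Char) (s' : List Char) (h : s'.head? ≠ some c) (n : Nat) (hn : 1 ≤ n) :
    hasDouble none (List.replicate n c ++ s') = (decide (n = 2) || hasDouble none s') := by
  by_cases h1 : n = 1
  · subst h1
    simp only [List.replicate_one, List.cons_append, List.nil_append]
    cases s' with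
    | nil => simp [hasDouble]
    | cons b r =>
      have hb : ¬ (c = b) := by simp at h; exact fun e => h e.symm
      rw [hasDouble, hasDouble_prev c (b::r) h]
      simp [hb]
  · obtain ⟨k, rfl⟩ : ∃ k, n = k + 2 := ⟨n - 2, by omega⟩
    rw [show List.replicate (k+2) c ++ s' = c :: c :: (List.replicate k c ++ s') from by
      simp [List.replicate_succ]]
    rw [hasDouble]
    by_cases hk : k = 0
    · subst hk
      simp only [List.replicate_zero, List.nil_append]
      simp [h]
    · have hd : (List.replicate k c ++ s').head? = some c := by
        obtain ⟨m, rfl⟩ : ∃ m, k = m + 1 := ⟨k - 1, by omega⟩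
        simp [List.replicate_succ]
      rw [show (c :: (List.replicate k c ++ s')) = List.replicate (k+1) c ++ s' from by
        simp [List.replicate_succ]]
      rw [hasDouble_run_aux c s' h (k+1) (by omega)]
      simp [hd]
      omega

theorem hasDouble_eq_runLengths_aux :
    ∀ (n : Nat) (s : List Char), s.length ≤ n → hasDouble none s = (runLengths s).contains 2 := by
  intro n
  induction n with
  | zero =>
    intro s hs
    have : s = [] := by cases s <;> simp at hs ⊢
    subst this
    simp [hasDouble, runLengths]
  | succ n ih =>
    intro s hs
    cases s with
    | nil => simp [hasDouble, runLengths]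
    | cons c rest =>
      set p : Char → Bool := fun d => decide (d = c) with hp
      set t := rest.takeWhile p with ht
      have hsplit : t ++ rest.dropWhile p = rest := List.takeWhile_append_dropWhile
      have hdrop : rest.drop t.length = rest.dropWhile p := by
        conv_lhs => rw [← hsplit]
        exact List.drop_left
      have htrep : t = List.replicate t.length c := by
        apply List.eq_replicate_iff.mpr
        refine ⟨rfl, fun b hb => ?_⟩
        have := List.mem_takeWhile_imp hb
        rw [hp] at this
        simpa using this
      have hhead : (rest.dropWhile p).head? ≠ some c := by
        have := List.head?_dropWhile_not p rest
        intro hcontra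
        rw [hcontra] at this
        simp [hp] at this
      have hS : c :: rest = List.replicate (t.length + 1) c ++ rest.dropWhile p := by
        conv_lhs => rw [← hsplit]
        rw [List.replicate_succ, htrep]
        simp
      have hlen : (rest.dropWhile p).length ≤ n := by
        have h1 : (rest.dropWhile p).length ≤ rest.length := List.length_dropWhile_le ..
        simp at hs
        omega
      rw [runLengths]
      simp only [← hp, ← ht, hdrop]
      rw [hS, hasDouble_run c _ hhead (t.length + 1) (by omega)]
      rw [ih _ hlen]
      simp

theorem hasDouble_eq_runLengths (s : List Char) :
    hasDouble none s = (runLengths s).contains 2 :=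
  hasDouble_eq_runLengths_aux s.length s le_rfl

theorem body_eq (x : Int) (t : Int) :
    (let xs := PySem.Int.toChars x
     if PySem.List.sorted xs (fun c => c) false = xs then
       let r := part2Inner xs xs.length 0 false true
       if r.1 && r.2 then t + 1 else t
     else t) =
    (let s := PySem.Int.toChars x
     if nondec s && (runLengths s).contains 2 then t + 1 else t) := by
  set s := PySem.Int.toChars x with hs
  by_cases hsort : PySem.List.sorted s (fun c => c) false = s
  · have hchain := (sorted_eq_iff_chain s).mp hsort
    have hinner := part2Inner_eq s hchain s.length 0 false (by omega)
    rw [List.drop_zero] at hinner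
    have hnd : nondec s = true := (nondec_iff_chain s).mpr hchain
    simp only [hsort, if_pos, hinner]
    simp [hnd, hasDouble_eq_runLengths s]
  · rw [if_neg hsort]
    have hnd : nondec s = false := by
      cases h : nondec s
      · rfl
      · exact absurd ((sorted_eq_iff_chain s).mpr ((nondec_iff_chain s).mp h)) hsort
    simp [hnd]

theorem foldl_congr' (f g : Int → Int → Int) (h : ∀ t x, f t x = g t x) :
    ∀ (l : List Int) (init : Int), l.foldl f init = l.foldl g init := by
  intro l
  induction l with
  | nil => intro init; rfl
  | cons a l ih => intro init; simp only [List.foldl_cons, h, ih]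

-- ===== VERDICT (by name: the statement is the Claim_ definition above) =====
theorem part2_spec : Claim_equal_part2 := by
  intro start end_ _
  unfold Spec_part2 part2 part2_alt
  exact foldl_congr' _ _ (fun t x => body_eq x t) _ 0
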